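-- pv_equiv track=rewrite | github.com/jdnCreations/50-challenges-python | prison_break.py | freed_prisoners
-- ===== SOURCE A (Python) =====
-- def free(list_of_cells, cell):
--     return list_of_cells[cell] == 1
--
-- def flip_cells(list_of_cells):
--     for i in range(len(list_of_cells)):
--         list_of_cells[i] ^= 1
--     return list_of_cells
--
-- def freed_prisoners(list_of_cells):
--     copied_list = list_of_cells.copy()
--     amount_freed = 0
--
--     if not free(copied_list, 0):
--         return 0
--
--     for i in range(len(list_of_cells)):
--         if free(copied_list, i):
--             amount_freed += 1
--             flip_cells(copied_list)
--     return amount_freed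
-- ===== SOURCE B (Python) =====
-- def freed_prisoners(list_of_cells):
--     if list_of_cells[0] != 1:
--         return 0
--     amount_freed = 0
--     flipped = False
--     for cell in list_of_cells:
--         if cell == (0 if flipped else 1):
--             amount_freed += 1
--             flipped = not flipped
--     return amount_freed
-- ===== Notes on version B (the rewrite author's own statement) =====
-- stated objective: alternative
-- what changed: B makes a single pass over the cells tracking a boolean flip parity instead of copying the list and re-flipping every cell each time a prisoner is freed.
import Mathlib
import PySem

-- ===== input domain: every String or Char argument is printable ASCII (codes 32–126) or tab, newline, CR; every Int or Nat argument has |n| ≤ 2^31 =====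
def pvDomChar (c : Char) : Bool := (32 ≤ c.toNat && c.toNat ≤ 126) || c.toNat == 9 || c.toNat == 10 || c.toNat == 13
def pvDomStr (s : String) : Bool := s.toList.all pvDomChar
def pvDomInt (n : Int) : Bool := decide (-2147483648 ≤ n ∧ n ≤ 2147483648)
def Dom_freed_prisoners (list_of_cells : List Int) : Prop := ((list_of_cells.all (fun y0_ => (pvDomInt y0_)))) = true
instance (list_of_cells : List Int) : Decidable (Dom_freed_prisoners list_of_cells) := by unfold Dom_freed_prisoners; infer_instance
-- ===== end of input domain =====

-- B replaces A's re-flip of the whole copied list at every freed cell by a single pass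
-- tracking a boolean flip parity; return values agree on all non-empty lists.

-- ===== PORT A =====
-- free(list_of_cells, cell): list_of_cells[cell] == 1 (Python raises IndexError out of range;
-- only reachable at cell 0 on the empty list, excluded by Pre_)
def pyFree (list_of_cells : List Int) (cell : Int) : Bool :=
  PySem.List.pyGet? list_of_cells cell == some 1

-- flip_cells: in-place xor of every cell with 1 (ported functionally; A only mutates its local copy)
def pyFlipCells (list_of_cells : List Int) : List Int :=
  list_of_cells.map (fun x => PySem.Int.bxor x 1)

def freed_prisoners (list_of_cells : List Int) : Int :=
  let copied_list := list_of_cells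
  let amount_freed : Int := 0
  if !(pyFree copied_list 0) then 0
  else
    ((PySem.List.pyRange 0 (list_of_cells.length : Int) 1).foldl
      (fun (st : List Int × Int) i =>
        if pyFree st.1 i then (pyFlipCells st.1, st.2 + 1) else st)
      (copied_list, amount_freed)).2

-- ===== PORT B =====
def freed_prisoners_alt (list_of_cells : List Int) : Int :=
  if !(PySem.List.pyGet? list_of_cells 0 == some 1) then 0
  else
    (list_of_cells.foldl
      (fun (st : Int × Bool) cell =>
        if cell == (if st.2 then (0 : Int) else 1) then (st.1 + 1, !st.2) else st)
      (0, false)).1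

-- ===== PRECONDITION & SPEC =====
-- Pre_ excludes only the empty list, on which both Pythons raise IndexError when reading the first cell.
def Pre_freed_prisoners (list_of_cells : List Int) : Prop := list_of_cells ≠ []
instance (list_of_cells : List Int) : Decidable (Pre_freed_prisoners list_of_cells) := by
  unfold Pre_freed_prisoners; infer_instance

def pvWitness_freed_prisoners : List Int := [1, 0, 0, 1]

def Spec_freed_prisoners (list_of_cells : List Int) (out : Int) : Prop := out = freed_prisoners_alt list_of_cells
instance (list_of_cells : List Int) (out : Int) : Decidable (Spec_freed_prisoners list_of_cells out) := by unfold Spec_freed_prisoners; infer_instance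

-- ===== CLAIM (what is proved, stated in full; the proofs are below) =====
def Claim_equal_freed_prisoners : Prop := ∀ (list_of_cells : List Int), Dom_freed_prisoners list_of_cells → Pre_freed_prisoners list_of_cells → Spec_freed_prisoners list_of_cells (freed_prisoners list_of_cells)

-- ===== LEMMAS AND PROOFS =====

-- the copied list after an even/odd number of whole-list flips
def condFlip (b : Bool) (l : List Int) : List Int := if b then pyFlipCells l else l

theorem bxor_one_eq (x : Int) : PySem.Int.bxor x 1 =
    if 0 ≤ x then ((x.toNat ^^^ 1 : Nat) : Int) else -(((-x-1).toNat ^^^ 1 : Nat) : Int) - 1 := by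
  simp [PySem.Int.bxor]

theorem bxor_one_eq_one_iff (x : Int) : PySem.Int.bxor x 1 = 1 ↔ x = 0 := by
  rw [bxor_one_eq]
  split
  · constructor
    · intro h
      have h1 : x.toNat ^^^ 1 = 1 := by exact_mod_cast h
      have h2 : x.toNat = 0 := Nat.xor_left_inj.mp (by simpa using h1)
      omega
    · intro h; subst h; rfl
  · constructor
    · intro h
      have : (0:Int) ≤ (((-x-1).toNat ^^^ 1 : Nat) : Int) := Int.natCast_nonneg _
      omega
    · intro h; omega

theorem bxor_one_bxor_one (x : Int) : PySem.Int.bxor (PySem.Int.bxor x 1) 1 = x := by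
  rw [bxor_one_eq, bxor_one_eq]
  split
  · rename_i h
    have hnn : (0:Int) ≤ ((x.toNat ^^^ 1 : Nat) : Int) := Int.natCast_nonneg _
    rw [if_pos hnn]
    have h1 : ((x.toNat ^^^ 1 : Nat) : Int).toNat = x.toNat ^^^ 1 := Int.toNat_natCast _
    rw [h1, Nat.xor_xor_cancel_right]
    omega
  · rename_i h
    have hx : (0:Int) ≤ (((-x-1).toNat ^^^ 1 : Nat) : Int) := Int.natCast_nonneg _
    rw [if_neg (by omega)]
    have h1 : (-(-((((-x-1).toNat ^^^ 1 : Nat) : Int)) - 1) - 1).toNat = (-x-1).toNat ^^^ 1 := by omega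
    rw [h1, Nat.xor_xor_cancel_right]
    omega

theorem pyFlipCells_condFlip (b : Bool) (l : List Int) :
    pyFlipCells (condFlip b l) = condFlip (!b) l := by
  cases b <;> simp [condFlip, pyFlipCells, List.map_map, Function.comp_def, bxor_one_bxor_one]

theorem free_condFlip (b : Bool) (l : List Int) (k : Nat) (hk : k < l.length) :
    pyFree (condFlip b l) (k : Int) = (l[k] == (if b then (0:Int) else 1)) := by
  cases b with
  | false =>
    simp [condFlip, pyFree, PySem.List.pyGet?_natCast, List.getElem?_eq_getElem hk]
  | true =>
    simp only [condFlip, if_pos, pyFree, pyFlipCells, PySem.List.pyGet?_natCast]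
    rw [List.getElem?_map, List.getElem?_eq_getElem hk]
    simp [bxor_one_eq_one_iff]

-- A's loop from index k with flip-parity b equals B's fold over the suffix from k
theorem loop_agree (l : List Int) : ∀ (d k : Nat) (b : Bool) (c : Int), k + d = l.length →
    ((PySem.List.pyRange (k : Int) (l.length : Int) 1).foldl
      (fun (st : List Int × Int) i =>
        if pyFree st.1 i then (pyFlipCells st.1, st.2 + 1) else st)
      (condFlip b l, c)).2
    = ((l.drop k).foldl
        (fun (st : Int × Bool) cell =>
          if cell == (if st.2 then (0 : Int) else 1) then (st.1 + 1, !st.2) else st)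
        (c, b)).1 := by
  intro d
  induction d with
  | zero =>
    intro k b c hk
    have hk' : (l.length : Int) ≤ (k : Int) := by omega
    rw [PySem.List.pyRange_one_eq_nil hk']
    have hd : l.drop k = [] := List.drop_eq_nil_of_le (by omega)
    rw [hd]
    simp
  | succ d ih =>
    intro k b c hk
    have hlt : (k : Int) < (l.length : Int) := by omega
    rw [PySem.List.pyRange_one_cons hlt]
    have hklt : k < l.length := by omega
    rw [List.drop_eq_getElem_cons hklt]
    simp only [List.foldl_cons]
    rw [free_condFlip b l k hklt]
    by_cases hc : l[k] = (if b then (0:Int) else 1)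
    · simp only [hc, beq_self_eq_true, if_true, pyFlipCells_condFlip]
      have h1 : ((k : Int) + 1) = ((k + 1 : Nat) : Int) := by push_cast; ring
      rw [h1, ih (k + 1) (!b) (c + 1) (by omega)]
    · have hb : (l[k] == (if b then (0:Int) else 1)) = false := by simpa using hc
      simp only [hb, Bool.false_eq_true, if_false]
      have h1 : ((k : Int) + 1) = ((k + 1 : Nat) : Int) := by push_cast; ring
      rw [h1, ih (k + 1) b c (by omega)]

-- ===== VERDICT (by name: the statement is the Claim_ definition above) =====
theorem freed_prisoners_spec : Claim_equal_freed_prisoners := by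
  intro l _ _
  unfold Spec_freed_prisoners freed_prisoners freed_prisoners_alt
  simp only []
  by_cases h : pyFree l 0
  · rw [if_neg (by simp [h]), if_neg (by simpa [pyFree] using h)]
    have := loop_agree l l.length 0 false 0 (by omega)
    simpa [condFlip] using this
  · rw [if_pos (by simp [h]), if_pos (by simpa [pyFree] using h)]
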